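-- pv_equiv track=rewrite | github.com/IuryOliveira567/Artificial-Intelligence | classic/utils/utilities.py | argmaxall
-- ===== SOURCE A (Python) =====
-- import math
--
-- def argmaxall(gen):
--
--     maxv = -math.inf
--     maxvals = []
--
--     for(e, v) in gen:
--         if v > maxv:
--             maxvals, maxv = [e], v
--         elif v == maxv:
--             maxvals.append(e)
--     return maxvals
-- ===== SOURCE B (Python) =====
-- def argmaxall(gen):
--     items = list(gen)
--     if not items:
--         return []
--     maxv = max(v for (_, v) in items)
--     return [e for (e, v) in items if v == maxv]
-- ===== Notes on version B (the rewrite author's own statement) =====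
-- stated objective: idiomatic
-- what changed: replaces the single fused pass that rebuilds/extends the running maxvals list with two plain passes: builtin max over the values, then a comprehension collecting the tied elements
import Mathlib
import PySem

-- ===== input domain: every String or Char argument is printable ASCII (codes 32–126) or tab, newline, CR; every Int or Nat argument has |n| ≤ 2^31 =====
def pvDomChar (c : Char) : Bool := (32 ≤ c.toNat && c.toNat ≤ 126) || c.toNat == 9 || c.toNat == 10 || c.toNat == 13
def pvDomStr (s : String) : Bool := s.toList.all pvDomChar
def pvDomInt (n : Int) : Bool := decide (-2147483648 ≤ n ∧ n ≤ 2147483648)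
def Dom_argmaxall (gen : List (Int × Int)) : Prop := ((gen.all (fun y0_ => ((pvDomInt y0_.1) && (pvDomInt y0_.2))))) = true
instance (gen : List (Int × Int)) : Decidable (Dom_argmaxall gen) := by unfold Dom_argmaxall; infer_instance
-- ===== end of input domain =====

-- B replaces A's single fused pass (which rebuilds/extends a running maxvals list) with two
-- plain passes: max over the values, then collecting the tied elements.

-- ===== PORT A =====
-- A's loop state: maxv starts at -inf (modelled as `none`, below every Int) and maxvals at [].
def argmaxallLoop : List (Int × Int) → Option Int → List Int → List Int
  | [], _, maxvals => maxvals
  | (e, v) :: rest, none, _ => argmaxallLoop rest (some v) [e]     -- v > -inf always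
  | (e, v) :: rest, some m, maxvals =>
      if v > m then argmaxallLoop rest (some v) [e]
      else if v == m then argmaxallLoop rest (some m) (maxvals ++ [e])
      else argmaxallLoop rest (some m) maxvals

def argmaxall (gen : List (Int × Int)) : List Int :=
  argmaxallLoop gen none []

-- ===== PORT B =====
def argmaxall_alt (gen : List (Int × Int)) : List Int :=
  match (gen.map Prod.snd).max? with
  | none => []
  | some m => (gen.filter (fun p => p.2 == m)).map Prod.fst

-- ===== PRECONDITION & SPEC =====
def Spec_argmaxall (gen : List (Int × Int)) (out : List Int) : Prop := out = argmaxall_alt gen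
instance (gen : List (Int × Int)) (out : List Int) : Decidable (Spec_argmaxall gen out) := by unfold Spec_argmaxall; infer_instance

-- ===== CLAIM (what is proved, stated in full; the proofs are below) =====
def Claim_equal_argmaxall : Prop := ∀ (gen : List (Int × Int)), Dom_argmaxall gen → Spec_argmaxall gen (argmaxall gen)

-- ===== LEMMAS AND PROOFS =====

-- max of the values of l seeded with m
def pvVm (l : List (Int × Int)) (m : Int) : Int := l.foldl (fun a p => max a p.2) m

theorem pvVm_ge (l : List (Int × Int)) (m : Int) : m ≤ pvVm l m := by
  induction l generalizing m with
  | nil => simp [pvVm]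
  | cons p rest ih =>
      have := ih (max m p.2)
      simp only [pvVm, List.foldl] at *
      exact le_trans (le_max_left m p.2) this

-- Invariant of A's loop with a real (non -inf) running max.
theorem argmaxallLoop_some (l : List (Int × Int)) (m : Int) (acc : List Int) :
    argmaxallLoop l (some m) acc =
      if pvVm l m > m then (l.filter (fun p => p.2 == pvVm l m)).map Prod.fst
      else acc ++ (l.filter (fun p => p.2 == m)).map Prod.fst := by
  induction l generalizing m acc with
  | nil => simp [pvVm, argmaxallLoop]
  | cons p rest ih =>
      obtain ⟨e, v⟩ := p
      have hM : pvVm ((e, v) :: rest) m = pvVm rest (max m v) := by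
        simp [pvVm, List.foldl]
      rw [hM]
      by_cases h1 : v > m
      · have hmx : max m v = v := by omega
        rw [hmx]
        simp only [argmaxallLoop, if_pos h1]
        rw [ih v [e]]
        have hge := pvVm_ge rest v
        by_cases h2 : pvVm rest v > v
        · rw [if_pos h2, if_pos (by omega)]
          have : (v == pvVm rest v) = false := by simp; omega
          simp [List.filter, this]
        · have hveq : pvVm rest v = v := by omega
          rw [if_neg h2, if_pos (by omega), hveq]
          simp [List.filter]
      · have hmx : max m v = m := by omega
        rw [hmx]
        by_cases h2 : v == m
        · have hv : v = m := by simpa using h2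
          simp only [argmaxallLoop, if_neg h1, if_pos h2]
          rw [ih m (acc ++ [e])]
          by_cases h3 : pvVm rest m > m
          · rw [if_pos h3, if_pos h3]
            have : (v == pvVm rest m) = false := by simp; omega
            simp [List.filter, this]
          · rw [if_neg h3, if_neg h3]
            simp [List.filter, hv]
        · simp only [argmaxallLoop, if_neg h1, if_neg h2]
          rw [ih m acc]
          by_cases h3 : pvVm rest m > m
          · rw [if_pos h3, if_pos h3]
            have hvne : (v == pvVm rest m) = false := by
              simp at h2 ⊢; omega
            simp [List.filter, hvne]
          · rw [if_neg h3, if_neg h3]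
            simp [List.filter, h2]

theorem pvVm_max_seed (l : List (Int × Int)) (v s : Int) :
    pvVm l (max v s) = max v (pvVm l s) := by
  induction l generalizing s with
  | nil => simp [pvVm]
  | cons q rest ih =>
      simp only [pvVm, List.foldl] at *
      rw [max_assoc, ih]

theorem pvMax?_eq (l : List (Int × Int)) (v : Int) :
    ((((v) :: l.map Prod.snd)).max?) = some (pvVm l v) := by
  induction l generalizing v with
  | nil => simp [pvVm]
  | cons p rest ih =>
      simp only [List.map, pvVm, List.foldl] at *
      rw [List.max?_cons, ih]
      simp only [Option.elim_some]
      congr 1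
      have := pvVm_max_seed rest v p.2
      simpa [pvVm] using this.symm

-- ===== VERDICT (by name: the statement is the Claim_ definition above) =====
theorem argmaxall_spec : Claim_equal_argmaxall := by
  intro gen _
  unfold Spec_argmaxall argmaxall argmaxall_alt
  cases gen with
  | nil => simp [argmaxallLoop]
  | cons p rest =>
      obtain ⟨e, v⟩ := p
      simp only [argmaxallLoop]
      rw [argmaxallLoop_some]
      rw [show ((((e, v) :: rest).map Prod.snd)).max? = some (pvVm rest v) from pvMax?_eq rest v]
      have hge := pvVm_ge rest v
      by_cases h : pvVm rest v > v
      · rw [if_pos h]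
        have : (v == pvVm rest v) = false := by simp; omega
        simp [List.filter, this]
      · have hveq : pvVm rest v = v := by omega
        rw [if_neg h, hveq]
        simp [List.filter]
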